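-- pv_equiv track=rewrite | github.com/peterostrander2/bookie-member-app | backend/live_data_router.py | cipher_reverse_reduction
-- ===== SOURCE A (Python) =====
-- def cipher_reverse_reduction(text: str) -> int:
--     """Reverse Reduction: Reverse + reduce to single digits"""
--     total = 0
--     for c in (text or "").upper():
--         if 65 <= ord(c) <= 90:
--             val = 27 - (ord(c) - 64)
--             while val > 9:
--                 val = sum(int(d) for d in str(val))
--             total += val
--     return total
-- ===== SOURCE B (Python) =====
-- def cipher_reverse_reduction(text: str) -> int:
--     """Reverse Reduction via closed-form digital root: 1 + (val-1) % 9."""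
--     return sum(1 + (90 - ord(c)) % 9 for c in (text or "").upper() if 'A' <= c <= 'Z')
-- ===== Notes on version B (the rewrite author's own statement) =====
-- stated objective: simpler
-- what changed: Replaced the iterative inner while-loop digit-summing (via str/int round-trips) with the constant-time closed-form digital root 1 + (val-1) % 9, and collapsed the accumulator loop into a single generator-expression sum.
import Mathlib
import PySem

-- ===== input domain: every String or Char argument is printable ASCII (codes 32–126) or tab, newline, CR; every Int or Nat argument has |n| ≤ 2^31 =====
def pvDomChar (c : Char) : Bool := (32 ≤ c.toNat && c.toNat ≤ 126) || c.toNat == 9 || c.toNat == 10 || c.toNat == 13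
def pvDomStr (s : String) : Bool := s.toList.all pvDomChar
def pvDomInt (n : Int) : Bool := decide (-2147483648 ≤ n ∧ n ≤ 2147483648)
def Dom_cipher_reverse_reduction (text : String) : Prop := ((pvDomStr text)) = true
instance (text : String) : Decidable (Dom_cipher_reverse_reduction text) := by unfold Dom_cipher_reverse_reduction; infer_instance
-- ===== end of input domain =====

-- B replaces A's inner while-loop digit-summing with the closed-form digital root 1 + (val-1) % 9 (objective: simpler).

-- ===== PORT A =====
-- sum(int(d) for d in str(val))
def pvDigitSum (val : Int) : Int :=
  ((PySem.Int.toStr val).toList.map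
    (fun d => (PySem.Int.ofStr? (String.ofList [d])).getD 0)).sum

-- `while val > 9: val = sum(int(d) for d in str(val))` — fuel is only a totality guard
def pvWhileReduce : Nat → Int → Int
  | 0, val => val
  | fuel + 1, val => if val > 9 then pvWhileReduce fuel (pvDigitSum val) else val

def cipher_reverse_reduction (text : String) : Int :=
  (PySem.Str.upper text).toList.foldl
    (fun total c =>
      if 65 ≤ (c.toNat : Int) ∧ (c.toNat : Int) ≤ 90 then
        let val : Int := 27 - ((c.toNat : Int) - 64)
        total + pvWhileReduce val.toNat val
      else total) 0

-- ===== PORT B =====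
def cipher_reverse_reduction_alt (text : String) : Int :=
  (((PySem.Str.upper text).toList.filter (fun c => 'A' ≤ c ∧ c ≤ 'Z')).map
    (fun c => 1 + ((90 : Int) - (c.toNat : Int)) % 9)).sum

-- ===== PRECONDITION & SPEC =====
def Spec_cipher_reverse_reduction (text : String) (out : Int) : Prop := out = cipher_reverse_reduction_alt text
instance (text : String) (out : Int) : Decidable (Spec_cipher_reverse_reduction text out) := by unfold Spec_cipher_reverse_reduction; infer_instance

-- ===== CLAIM (what is proved, stated in full; the proofs are below) =====
def Claim_equal_cipher_reverse_reduction : Prop := ∀ (text : String), Dom_cipher_reverse_reduction text → Spec_cipher_reverse_reduction text (cipher_reverse_reduction text)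

-- ===== LEMMAS AND PROOFS =====

-- per-letter value: the while loop equals the closed-form digital root, for codes 65..90
theorem pvStep (n : Nat) (h1 : 65 ≤ n) (h2 : n ≤ 90) :
    pvWhileReduce (27 - ((n : Int) - 64)).toNat (27 - ((n : Int) - 64))
      = 1 + ((90 : Int) - (n : Int)) % 9 := by
  interval_cases n <;> decide

theorem pvGuard (c : Char) :
    (65 ≤ (c.toNat : Int) ∧ (c.toNat : Int) ≤ 90) ↔ ('A' ≤ c ∧ c ≤ 'Z') := by
  rw [Char.le_def, Char.le_def]
  simp only [UInt32.le_iff_toNat_le]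
  change _ ↔ (65 ≤ c.toNat ∧ c.toNat ≤ 90)
  omega

theorem pvFold (l : List Char) (t : Int) :
    l.foldl
      (fun total c =>
        if 65 ≤ (c.toNat : Int) ∧ (c.toNat : Int) ≤ 90 then
          let val : Int := 27 - ((c.toNat : Int) - 64)
          total + pvWhileReduce val.toNat val
        else total) t
      = t + ((l.filter (fun c => 'A' ≤ c ∧ c ≤ 'Z')).map
              (fun c => 1 + ((90 : Int) - (c.toNat : Int)) % 9)).sum := by
  induction l generalizing t with
  | nil => simp
  | cons c l ih =>
    by_cases h : 'A' ≤ c ∧ c ≤ 'Z'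
    · have hg : 65 ≤ (c.toNat : Int) ∧ (c.toNat : Int) ≤ 90 := (pvGuard c).mpr h
      have hn1 : 65 ≤ c.toNat := by exact_mod_cast hg.1
      have hn2 : c.toNat ≤ 90 := by exact_mod_cast hg.2
      simp only [List.foldl_cons, List.filter_cons, if_pos hg, h, decide_true,
        and_self, if_true, List.map_cons, List.sum_cons]
      rw [ih]
      rw [pvStep c.toNat hn1 hn2]
      ring
    · have hg : ¬ (65 ≤ (c.toNat : Int) ∧ (c.toNat : Int) ≤ 90) := fun hh => h ((pvGuard c).mp hh)
      simp only [List.foldl_cons, List.filter_cons, if_neg hg]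
      rw [ih]
      have : ¬ (decide ('A' ≤ c) && decide (c ≤ 'Z')) = true := by
        simpa [decide_eq_true_iff] using h
      simp [h]

-- ===== VERDICT (by name: the statement is the Claim_ definition above) =====
theorem cipher_reverse_reduction_spec : Claim_equal_cipher_reverse_reduction := by
  intro text _
  unfold Spec_cipher_reverse_reduction cipher_reverse_reduction cipher_reverse_reduction_alt
  rw [pvFold]
  simp
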